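-- pv_equiv track=rewrite | github.com/DDMAL/cantus | app/public/cantusdata/helpers/search_utils.py | get_transpositions
-- ===== SOURCE A (Python) =====
-- def transpose_up_unicode(x: int) -> int:
--     """
--     Transpose up the unicode decimal for a pitch
--     name up 1 step. The unicode decimal for "g" is 103,
--     so to transpose up from "g" to "a", we need to subtract 6.
--     We can transpose up all other pitch names by adding 1.
--     """
--     # x is the unicode decimal for "a-f"
--     if x < 103:
--         return x + 1
--     # x is the unicode decimal for "g"
--     return x - 6
--
-- def get_transpositions(sequence: list[str]) -> list[list[str]]:
--     """
--     Given a series of pitch names (no flats or sharps - just abcdefg),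
--     return a list of the 7 possible transpositions of the melody.
--
--     e.g. get_transpositions('cece') returns ['cece', 'dfdf', 'egeg', 'fafa',
--     'gbgb', 'acac', 'bdbd']
--     """
--     # Get the unicode decimal for each character in the sequence
--     asciinum = list(map(ord, sequence))
--
--     transpositions = [sequence]
--
--     for _ in range(1, 7):
--         asciinum = list(map(transpose_up_unicode, asciinum))
--         transposed_chars = list(map(chr, asciinum))
--         transpositions.append(transposed_chars)
--     return transpositions
-- ===== SOURCE B (Python) =====
-- def get_transpositions(sequence: list[str]) -> list[list[str]]:
--     # Build each note's 6-step transposition orbit first, then assemble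
--     # rows 1..6 column-major; row 0 is the original sequence.
--     chains = []
--     for ch in sequence:
--         x = ord(ch)
--         chain = []
--         for _ in range(6):
--             x = x + 1 if x < 103 else x - 6
--             chain.append(chr(x))
--         chains.append(chain)
--     return [sequence] + [[chain[t] for chain in chains] for t in range(6)]
-- ===== Notes on version B (the rewrite author's own statement) =====
-- stated objective: alternative
-- what changed: B computes each character's full 6-step transposition orbit first and then assembles the 6 transposed rows column-major from those per-character chains, instead of A's repeated row-by-row remapping of the whole int sequence.
import Mathlib
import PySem

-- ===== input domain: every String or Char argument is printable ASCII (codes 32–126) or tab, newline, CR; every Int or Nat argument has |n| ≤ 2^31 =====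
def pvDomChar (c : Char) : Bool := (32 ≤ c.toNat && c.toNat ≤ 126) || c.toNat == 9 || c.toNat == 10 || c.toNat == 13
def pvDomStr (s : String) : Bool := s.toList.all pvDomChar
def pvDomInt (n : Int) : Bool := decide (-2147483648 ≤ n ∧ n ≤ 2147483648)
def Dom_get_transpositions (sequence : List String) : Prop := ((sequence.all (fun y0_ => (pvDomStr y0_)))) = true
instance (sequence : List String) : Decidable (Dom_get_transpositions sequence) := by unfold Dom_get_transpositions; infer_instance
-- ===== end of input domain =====

-- B builds each character's 6-step transposition orbit first and assembles rows
-- column-major, instead of A's row-by-row remapping; same arithmetic, same cost.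


-- ===== PORT A =====
def transpose_up_unicode (x : Int) : Int := if x < 103 then x + 1 else x - 6

-- ord(s): exact for the one-character strings Pre_ admits
def pvOrd (s : String) : Int := (s.toList.headI.toNat : Int)
-- chr(x): exact for the non-negative code points reached here
def pvChr (x : Int) : String := String.ofList [Char.ofNat x.toNat]

def get_transpositions (sequence : List String) : List (List String) :=
  let asciinum := sequence.map pvOrd
  let st := (List.range 6).foldl
    (fun (st : List Int × List (List String)) _ =>
      let a := st.1.map transpose_up_unicode
      (a, st.2 ++ [a.map pvChr]))
    (asciinum, [sequence])
  st.2

-- ===== PORT B =====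
def orbitChain : Int → Nat → List String
  | _, 0 => []
  | x, Nat.succ n =>
    let y := if x < 103 then x + 1 else x - 6
    pvChr y :: orbitChain y n

def get_transpositions_alt (sequence : List String) : List (List String) :=
  let chains := sequence.map (fun s => orbitChain (pvOrd s) 6)
  sequence :: (List.range 6).map (fun t => chains.map (fun chain => chain.getD t ""))

-- ===== PRECONDITION & SPEC =====
-- Pre_ excludes inputs where Python's ord raises TypeError: any element not a
-- one-character string (both A and B raise there).
def Pre_get_transpositions (sequence : List String) : Prop :=
  ∀ s ∈ sequence, s.toList.length = 1
instance (sequence : List String) : Decidable (Pre_get_transpositions sequence) := by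
  unfold Pre_get_transpositions; infer_instance

def pvWitness_get_transpositions : List String := ["c", "e", "c", "e"]

def Spec_get_transpositions (sequence : List String) (out : List (List String)) : Prop := out = get_transpositions_alt sequence
instance (sequence : List String) (out : List (List String)) : Decidable (Spec_get_transpositions sequence out) := by unfold Spec_get_transpositions; infer_instance

-- ===== CLAIM (what is proved, stated in full; the proofs are below) =====
def Claim_equal_get_transpositions : Prop := ∀ (sequence : List String), Dom_get_transpositions sequence → Pre_get_transpositions sequence → Spec_get_transpositions sequence (get_transpositions sequence)

-- ===== LEMMAS AND PROOFS =====
def iterStep : Nat → Int → Int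
  | 0, x => x
  | n + 1, x => iterStep n (transpose_up_unicode x)

theorem iterStep_succ' (n : Nat) (x : Int) :
    iterStep (n + 1) x = transpose_up_unicode (iterStep n x) := by
  induction n generalizing x with
  | zero => rfl
  | succ n ih =>
    show iterStep (n + 1) (transpose_up_unicode x) = _
    rw [ih]
    rfl

theorem orbitChain_eq (n : Nat) (x : Int) :
    orbitChain x n = (List.range n).map (fun t => pvChr (iterStep (t + 1) x)) := by
  induction n generalizing x with
  | zero => rfl
  | succ n ih =>
    rw [List.range_succ_eq_map]
    simp only [List.map_cons, List.map_map, orbitChain, ih]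
    refine congrArg₂ _ rfl ?_
    apply List.map_congr_left
    intro t _
    simp [Function.comp, iterStep, transpose_up_unicode]

theorem foldlA (init : List Int) (seq : List String) (n : Nat) :
    (List.range n).foldl
      (fun (st : List Int × List (List String)) _ =>
        let a := st.1.map transpose_up_unicode
        (a, st.2 ++ [a.map pvChr]))
      (init, [seq])
    = (init.map (fun x => iterStep n x),
       seq :: (List.range n).map (fun t => init.map (fun x => pvChr (iterStep (t + 1) x)))) := by
  induction n with
  | zero => simp [iterStep]
  | succ n ih =>
    rw [List.range_succ, List.foldl_append, ih]
    simp only [List.foldl_cons, List.foldl_nil, List.map_map, List.map_append]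
    refine congrArg₂ Prod.mk ?_ ?_
    · apply List.map_congr_left
      intro x _
      simp [Function.comp, iterStep_succ']
    · simp only [List.cons_append]
      refine congrArg₂ _ rfl ?_
      refine congrArg₂ _ rfl ?_
      simp [Function.comp, iterStep_succ']

theorem getD_map_range (n t : Nat) (f : Nat → String) (h : t < n) :
    ((List.range n).map f).getD t "" = f t := by
  rw [List.getD_eq_getElem?_getD, List.getElem?_map, List.getElem?_range h]
  rfl

-- ===== VERDICT (by name: the statement is the Claim_ definition above) =====
theorem get_transpositions_spec : Claim_equal_get_transpositions := by
  intro sequence _ _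
  show get_transpositions sequence = get_transpositions_alt sequence
  unfold get_transpositions get_transpositions_alt
  simp only [foldlA]
  refine congrArg₂ _ rfl ?_
  apply List.map_congr_left
  intro t ht
  rw [List.mem_range] at ht
  rw [List.map_map, List.map_map]
  apply List.map_congr_left
  intro s _
  simp only [Function.comp, orbitChain_eq, getD_map_range 6 t _ ht]
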